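-- pv_equiv track=rewrite | github.com/Joker7822/loto7 | test_with_gnn.py | evaluate_self_predictions
-- ===== SOURCE A (Python) =====
-- def evaluate_self_predictions(self_predictions, true_data):
--     """
--     自己予測リストと本物データを比較して一致数を評価
--     :param self_predictions: [[5,12,17,22,30,34,37], ...]
--     :param true_data: 過去の本物本数字データ（data['本数字'].tolist()）
--     :return: 各自己予測に対応する最大一致数リスト
--     """
--     scores = []
--     true_sets = [set(nums) for nums in true_data]
--
--     for pred in self_predictions:
--         pred_set = set(pred)
--         max_match = 0
--         for true_set in true_sets:
--             match = len(pred_set & true_set)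
--             if match > max_match:
--                 max_match = match
--         scores.append(max_match)
--
--     return scores
-- ===== SOURCE B (Python) =====
-- def evaluate_self_predictions(self_predictions, true_data):
--     """Inverted-index reimplementation: map each number to the true-data rows
--     containing it, then score each prediction by accumulating per-row hit counts
--     instead of computing pairwise set intersections."""
--     true_sets = [set(nums) for nums in true_data]
--     n = len(true_sets)
--     index = {}
--     for j, t in enumerate(true_sets):
--         for x in t:
--             index.setdefault(x, []).append(j)
--     scores = []
--     for pred in self_predictions:
--         counts = [0] * n
--         for x in set(pred):
--             for j in index.get(x, ()):
--                 counts[j] += 1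
--         scores.append(max(counts, default=0))
--     return scores
-- ===== Notes on version B (the rewrite author's own statement) =====
-- stated objective: alternative
-- what changed: Replaces the per-prediction scan over true sets with pairwise set intersections by an inverted index from each number to the true rows containing it, accumulating per-row hit counts per prediction and taking their maximum.
import Mathlib
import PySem

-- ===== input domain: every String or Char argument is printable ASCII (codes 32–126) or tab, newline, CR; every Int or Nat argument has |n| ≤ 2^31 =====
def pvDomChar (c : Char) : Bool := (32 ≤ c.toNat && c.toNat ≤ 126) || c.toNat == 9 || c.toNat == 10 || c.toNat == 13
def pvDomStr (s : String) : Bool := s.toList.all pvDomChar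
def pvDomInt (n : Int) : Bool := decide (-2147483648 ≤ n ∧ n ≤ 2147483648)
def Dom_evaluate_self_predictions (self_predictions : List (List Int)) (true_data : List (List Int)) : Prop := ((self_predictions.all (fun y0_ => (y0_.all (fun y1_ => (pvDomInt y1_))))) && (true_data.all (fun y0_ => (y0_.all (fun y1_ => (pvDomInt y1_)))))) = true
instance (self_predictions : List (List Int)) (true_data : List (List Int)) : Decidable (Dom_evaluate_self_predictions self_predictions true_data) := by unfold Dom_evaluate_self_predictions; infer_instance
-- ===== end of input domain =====

-- B replaces A's pairwise set intersections by an inverted index (number -> true rows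
-- containing it) and per-row hit counters; equal return value is proved (alternative, not claimed faster).

-- ===== PORT A =====
def evaluate_self_predictions (self_predictions : List (List Int)) (true_data : List (List Int)) : List Int :=
  let true_sets := true_data.map (fun nums => PySem.Set.ofList nums)
  self_predictions.foldl (fun scores pred =>
    let pred_set := PySem.Set.ofList pred
    let max_match := true_sets.foldl (fun max_match true_set =>
      let m : Int := ((PySem.Set.inter pred_set true_set).length : Int)
      if m > max_match then m else max_match) 0
    scores ++ [max_match]) []

-- ===== PORT B =====
def evaluate_self_predictions_alt (self_predictions : List (List Int)) (true_data : List (List Int)) : List Int :=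
  let true_sets := true_data.map (fun nums => PySem.Set.ofList nums)
  let n := true_sets.length
  -- index = {}; for j, t in enumerate(true_sets): for x in t: index.setdefault(x, []).append(j)
  let index : PySem.Dict Int (List Int) :=
    (PySem.List.enumerate true_sets).foldl (fun idx jt =>
      jt.2.foldl (fun idx x => idx.modify x [] (fun js => js ++ [jt.1])) idx) PySem.Dict.empty
  self_predictions.foldl (fun scores pred =>
    let counts0 := PySem.List.pyRepeat [(0 : Int)] (n : Int)       -- [0] * n
    let counts := (PySem.Set.ofList pred).foldl (fun counts x =>
      (index.getD x []).foldl (fun counts j =>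
        PySem.List.pySetD counts j (PySem.List.pyGetD counts j 0 + 1)) counts) counts0
    scores ++ [PySem.List.maxD counts (fun y => y) 0]) []

-- ===== PRECONDITION & SPEC =====
def Spec_evaluate_self_predictions (self_predictions : List (List Int)) (true_data : List (List Int)) (out : List Int) : Prop := out = evaluate_self_predictions_alt self_predictions true_data
instance (self_predictions : List (List Int)) (true_data : List (List Int)) (out : List Int) : Decidable (Spec_evaluate_self_predictions self_predictions true_data out) := by unfold Spec_evaluate_self_predictions; infer_instance

-- ===== CLAIM (what is proved, stated in full; the proofs are below) =====
def Claim_equal_evaluate_self_predictions : Prop := ∀ (self_predictions : List (List Int)) (true_data : List (List Int)), Dom_evaluate_self_predictions self_predictions true_data → Spec_evaluate_self_predictions self_predictions true_data (evaluate_self_predictions self_predictions true_data)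

-- ===== LEMMAS AND PROOFS =====

-- the bump step 'counts[j] += 1'
def pvStep (cs : List Int) (j : Int) : List Int :=
  PySem.List.pySetD cs j (PySem.List.pyGetD cs j 0 + 1)

-- the inverted index built by B
def pvIndex (ts : List (PySem.Set Int)) : PySem.Dict Int (List Int) :=
  (PySem.List.enumerate ts).foldl (fun idx jt =>
    jt.2.foldl (fun idx x => idx.modify x [] (fun js => js ++ [jt.1])) idx) PySem.Dict.empty

lemma pv_flatMap_ite {α β : Type} (l : List α) (p : α → Bool) (f : α → β) :
    l.flatMap (fun a => if p a then [f a] else []) = (l.filter p).map f := by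
  induction l with
  | nil => rfl
  | cons a t ih =>
    by_cases h : p a = true <;> simp [List.flatMap_cons, h, ih]

lemma pv_filter_beq_of_nodup {t : List Int} (h : t.Nodup) (x : Int) :
    t.filter (· == x) = if x ∈ t then [x] else [] := by
  induction t with
  | nil => simp
  | cons a s ih =>
    rw [List.nodup_cons] at h
    obtain ⟨ha, hs⟩ := h
    by_cases hax : a = x
    · subst hax
      have hnil : List.filter (· == a) s = [] := List.filter_eq_nil_iff.mpr (fun b hb => by
        simp only [beq_iff_eq]; intro hb2; exact ha (hb2 ▸ hb))
      simp [hnil, ha]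
    · simp [hax, ih hs, Ne.symm hax]

-- index correctness
lemma pvIndex_getD (ts : List (PySem.Set Int)) (hnd : ∀ t ∈ ts, t.Nodup) (x : Int) :
    (pvIndex ts).getD x [] =
      (((PySem.List.enumerate ts).filter (fun jt => jt.2.contains x)).map (fun jt => jt.1)) := by
  have h1 : pvIndex ts =
      ((PySem.List.enumerate ts).flatMap (fun jt => jt.2.map (fun y => (y, jt.1)))).foldl
        (fun d p => d.modify p.1 [] (fun js => js ++ [p.2])) PySem.Dict.empty := by
    rw [List.foldl_flatMap]
    unfold pvIndex
    refine PySem.List.foldl_congr_mem _ _ _ _ (fun d jt _ => ?_)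
    rw [List.foldl_map]
  rw [h1, PySem.Dict.getD_foldl_modify_append]
  simp only [PySem.Dict.getD_empty, List.nil_append]
  rw [List.filter_flatMap]
  have h2 : ∀ jt ∈ PySem.List.enumerate ts,
      ((jt.2.map (fun y => (y, jt.1))).filter (fun p => p.1 == x)).map (fun p => p.2)
        = (if jt.2.contains x then [jt.1] else []) := by
    intro jt hjt
    have hmem : jt.2 ∈ ts := by
      obtain ⟨k, hk, rfl⟩ := (PySem.List.mem_enumerate_iff _ _ _).mp hjt
      exact List.getElem_mem hk
    rw [List.filter_map]
    have heq : (fun p : Int × Int => p.1 == x) ∘ (fun y : Int => (y, jt.1)) = (fun y => y == x) := rfl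
    rw [heq, pv_filter_beq_of_nodup (hnd _ hmem) x]
    by_cases hx : x ∈ jt.2 <;> simp [hx]
  calc ((PySem.List.enumerate ts).flatMap
          (fun jt => ((jt.2.map (fun y => (y, jt.1))).filter (fun p => p.1 == x)))).map (fun p => p.2)
      = (PySem.List.enumerate ts).flatMap
          (fun jt => (((jt.2.map (fun y => (y, jt.1))).filter (fun p => p.1 == x))).map (fun p => p.2)) := by
        rw [List.map_flatMap]
    _ = (PySem.List.enumerate ts).flatMap (fun jt => if jt.2.contains x then [jt.1] else []) := by
        exact List.flatMap_congr (fun jt hjt => h2 jt hjt)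
    _ = _ := pv_flatMap_ite _ _ _

-- rows below the enumeration start never occur in the index list
lemma pv_count_small (ts : List (PySem.Set Int)) (x : Int) (s v : Int) (hv : v < s) :
    ((((PySem.List.enumerate ts s).filter (fun jt => jt.2.contains x)).map (fun jt => jt.1)).count v) = 0 := by
  refine List.count_eq_zero.mpr ?_
  intro hmem
  obtain ⟨jt, hjt, hfst⟩ := List.mem_map.mp hmem
  have hjt' := (List.mem_filter.mp hjt).1
  obtain ⟨k, hk, rfl⟩ := (PySem.List.mem_enumerate_iff _ _ _).mp hjt'
  simp at hfst
  omega

-- occurrence count of row k in the index list for x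
lemma pv_count_index (ts : List (PySem.Set Int)) (x : Int) :
    ∀ (s : Int) (k : Nat), k < ts.length →
    ((((PySem.List.enumerate ts s).filter (fun jt => jt.2.contains x)).map (fun jt => jt.1)).count (s + (k : Int)))
      = (if (ts.getD k PySem.Set.empty).contains x then 1 else 0) := by
  induction ts with
  | nil => intro s k hk; simp at hk
  | cons t ts ih =>
    intro s k hk
    rw [PySem.List.enumerate_cons]
    cases k with
    | zero =>
      have hsmall := pv_count_small ts x (s + 1) s (by omega)
      simp at hsmall
      by_cases hx : x ∈ t <;>
        simp [hx, hsmall]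
    | succ k' =>
      have ih' := ih (s + 1) k' (by simpa using hk)
      have harith : s + 1 + (k' : Int) = s + ((k' + 1 : Nat) : Int) := by push_cast; ring
      rw [harith] at ih'
      have hne : s ≠ s + ((k' + 1 : Nat) : Int) := by push_cast; omega
      simp at ih'
      by_cases hx : x ∈ t <;>
        simp [hx, List.count_cons, ih'] <;> omega

-- one bump: length preserved, pointwise effect
lemma pv_step_length (cs : List Int) (j : Int) (h0 : 0 ≤ j) :
    (pvStep cs j).length = cs.length := by
  unfold pvStep
  rw [PySem.List.pySetD_of_nonneg _ _ h0, List.length_set]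

lemma pv_step_getD (cs : List Int) (j : Int) (h0 : 0 ≤ j) (hl : j < (cs.length : Int)) (k : Nat) :
    (pvStep cs j).getD k 0 = if (k : Int) = j then cs.getD k 0 + 1 else cs.getD k 0 := by
  unfold pvStep
  rw [PySem.List.pySetD_of_nonneg _ _ h0, PySem.List.pyGetD_eq_getElem cs 0 h0 hl]
  by_cases hkj : (k : Int) = j
  · have hk : k = j.toNat := by omega
    subst hk
    rw [if_pos hkj]
    rw [List.getD_eq_getElem _ _ (by simp; omega), List.getElem_set_self (by simp; omega),
        List.getD_eq_getElem _ _ (by omega)]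
  · rw [if_neg hkj]
    have hne : j.toNat ≠ k := by omega
    by_cases hk : k < cs.length
    · rw [List.getD_eq_getElem _ _ (by simp; omega),
          List.getElem_set_ne hne, List.getD_eq_getElem _ _ hk]
    · rw [List.getD_eq_default _ _ (by simp; omega),
          List.getD_eq_default _ _ (by omega)]

-- a list of bumps: counts[k] grows by the number of occurrences of k
lemma pv_bumps (js : List Int) : ∀ (cs : List Int), (∀ j ∈ js, 0 ≤ j ∧ j < (cs.length : Int)) →
    (js.foldl pvStep cs).length = cs.length ∧
    ∀ k : Nat, (js.foldl pvStep cs).getD k 0 = cs.getD k 0 + (js.count (k : Int) : Int) := by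
  induction js with
  | nil => intro cs _; simp
  | cons j js ih =>
    intro cs h
    have hj := h j (by simp)
    have hlen := pv_step_length cs j hj.1
    have h' : ∀ i ∈ js, 0 ≤ i ∧ i < ((pvStep cs j).length : Int) := by
      intro i hi; rw [hlen]; exact h i (by simp [hi])
    obtain ⟨ihlen, ihgd⟩ := ih (pvStep cs j) h'
    refine ⟨by rw [List.foldl_cons, ihlen, hlen], fun k => ?_⟩
    rw [List.foldl_cons, ihgd k, pv_step_getD cs j hj.1 hj.2 k, List.count_cons]
    by_cases hkj : (k : Int) = j
    · simp [hkj]; ring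
    · have hb : ((j == (k : Int)) : Bool) = false := by simpa [beq_eq_false_iff_ne] using (Ne.symm hkj)
      simp [hkj, hb]

-- the nested bump loop over the prediction's numbers
lemma pv_counts (idxList : Int → List Int) (xs : List Int) :
    ∀ (cs : List Int), (∀ x ∈ xs, ∀ j ∈ idxList x, 0 ≤ j ∧ j < (cs.length : Int)) →
    (xs.foldl (fun cs x => (idxList x).foldl pvStep cs) cs).length = cs.length ∧
    ∀ k : Nat, (xs.foldl (fun cs x => (idxList x).foldl pvStep cs) cs).getD k 0
      = cs.getD k 0 + ((xs.map (fun x => ((idxList x).count (k : Int) : Int))).sum) := by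
  induction xs with
  | nil => intro cs _; simp
  | cons x xs ih =>
    intro cs h
    obtain ⟨blen, bgd⟩ := pv_bumps (idxList x) cs (h x (by simp))
    have h' : ∀ y ∈ xs, ∀ j ∈ idxList y, 0 ≤ j ∧ j < ((((idxList x).foldl pvStep cs)).length : Int) := by
      intro y hy j hj; rw [blen]; exact h y (by simp [hy]) j hj
    obtain ⟨ihlen, ihgd⟩ := ih _ h'
    refine ⟨by rw [List.foldl_cons, ihlen, blen], fun k => ?_⟩
    rw [List.foldl_cons, ihgd k, bgd k, List.map_cons, List.sum_cons]
    ring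

lemma pv_ite_max (a b : Int) : (if b > a then b else a) = max a b := by
  rw [max_def]; split_ifs <;> omega

lemma pv_foldl_max_eq_maxD (l : List Int) (h : ∀ y ∈ l, 0 ≤ y) :
    l.foldl max 0 = PySem.List.maxD l (fun y => y) 0 := by
  cases l with
  | nil => rfl
  | cons a t =>
    unfold PySem.List.maxD
    rw [PySem.List.max?_id_cons]
    have hm : max 0 a = a := max_eq_right (h a (by simp))
    simp only [List.foldl_cons, hm, Option.getD_some]

-- the per-prediction score of each side is the same
lemma pv_per_pred (ts : List (PySem.Set Int)) (hnd : ∀ t ∈ ts, t.Nodup) (pred : List Int) :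
    ts.foldl (fun mm t =>
      if ((PySem.Set.inter (PySem.Set.ofList pred) t).length : Int) > mm
      then ((PySem.Set.inter (PySem.Set.ofList pred) t).length : Int) else mm) 0
    = PySem.List.maxD
        ((PySem.Set.ofList pred).foldl (fun counts x =>
           ((pvIndex ts).getD x []).foldl pvStep counts)
         (PySem.List.pyRepeat [(0 : Int)] ((ts.length : Int))))
        (fun y => y) 0 := by
  set P := PySem.Set.ofList pred with hP
  set f : PySem.Set Int → Int := fun t => ((PySem.Set.inter P t).length : Int) with hf
  have hA : ts.foldl (fun mm t => if f t > mm then f t else mm) 0 = (ts.map f).foldl max 0 := by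
    rw [List.foldl_map]
    exact PySem.List.foldl_congr_mem _ _ _ _ (fun mm t _ => pv_ite_max mm (f t))
  have hc0 : PySem.List.pyRepeat [(0 : Int)] ((ts.length : Int)) = List.replicate ts.length (0 : Int) := by
    rw [PySem.List.pyRepeat_singleton]; simp
  have hidx : ∀ x : Int, (pvIndex ts).getD x []
      = (((PySem.List.enumerate ts).filter (fun jt => jt.2.contains x)).map (fun jt => jt.1)) :=
    fun x => pvIndex_getD ts hnd x
  have hrange : ∀ x ∈ P, ∀ j ∈ (pvIndex ts).getD x [],
      0 ≤ j ∧ j < (((List.replicate ts.length (0 : Int)).length : Nat) : Int) := by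
    intro x _ j hj
    rw [hidx x] at hj
    obtain ⟨jt, hjt, rfl⟩ := List.mem_map.mp hj
    obtain ⟨k, hk, rfl⟩ := (PySem.List.mem_enumerate_iff _ _ _).mp (List.mem_filter.mp hjt).1
    simp only [List.length_replicate]
    simp
    omega
  obtain ⟨hclen, hcgd⟩ := pv_counts (fun x => (pvIndex ts).getD x []) P
      (List.replicate ts.length (0 : Int)) hrange
  rw [hA, hc0]
  have hcount_eq : P.foldl (fun counts x => ((pvIndex ts).getD x []).foldl pvStep counts)
      (List.replicate ts.length (0 : Int)) = ts.map f := by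
    apply List.ext_getElem
    · rw [hclen]; simp
    · intro k hk1 hk2
      have hkts : k < ts.length := by simpa using hk2
      rw [← List.getD_eq_getElem _ 0 hk1]
      rw [hcgd k]
      have hrep : (List.replicate ts.length (0 : Int)).getD k 0 = 0 := by
        rw [List.getD_eq_getElem _ _ (by simpa using hkts)]; simp
      have hcnt : ∀ x : Int, (((pvIndex ts).getD x []).count (k : Int) : Int)
          = (if (ts.getD k PySem.Set.empty).contains x then (1 : Int) else 0) := by
        intro x
        rw [hidx x]
        have hci := pv_count_index ts x 0 k hkts
        rw [zero_add] at hci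
        rw [hci]
        split_ifs <;> simp
      have hsum : (P.map (fun x => (((pvIndex ts).getD x []).count (k : Int) : Int))).sum
          = (P.map (fun x => if (ts.getD k PySem.Set.empty).contains x then (1 : Int) else 0)).sum := by
        exact congrArg List.sum (List.map_congr_left (fun x _ => hcnt x))
      rw [hrep, zero_add, hsum, PySem.List.sum_map_ite_one_zero]
      rw [List.getElem_map]
      have hgetd : ts.getD k PySem.Set.empty = ts[k] := List.getD_eq_getElem ts _ hkts
      rw [hgetd]
      simp [hf, PySem.Set.inter, List.countP_eq_length_filter]
      exact congrArg List.length (List.filter_congr (fun x _ => by simp))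
  rw [hcount_eq]
  have hnonneg : ∀ y ∈ ts.map f, 0 ≤ y := by
    intro y hy
    obtain ⟨t, _, rfl⟩ := List.mem_map.mp hy
    exact Int.natCast_nonneg _
  exact pv_foldl_max_eq_maxD (ts.map f) hnonneg

-- ===== VERDICT (by name: the statement is the Claim_ definition above) =====
theorem evaluate_self_predictions_spec : Claim_equal_evaluate_self_predictions := by
  intro sp td _
  unfold Spec_evaluate_self_predictions evaluate_self_predictions evaluate_self_predictions_alt
  simp only []
  rw [PySem.List.foldl_append_singleton_eq_map, PySem.List.foldl_append_singleton_eq_map]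
  refine congrArg _ (List.map_congr_left (fun pred _ => ?_))
  have hnd : ∀ t ∈ td.map (fun nums => PySem.Set.ofList nums), t.Nodup := by
    intro t ht
    obtain ⟨nums, _, rfl⟩ := List.mem_map.mp ht
    exact PySem.Set.nodup_ofList nums
  have h := pv_per_pred (td.map (fun nums => PySem.Set.ofList nums)) hnd pred
  simpa [pvIndex, pvStep] using h
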